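-- pv_equiv track=rewrite | github.com/krzki/pydopast | tests/delta_module/util_test.py | fix_indent_from_str
-- ===== SOURCE A (Python) =====
-- def fix_indent_from_str(code: str):
--     # TODO: Fix case \t\t\t \n \t\t def ....
--
--     code = code.strip('\n')
--     indent_len = 0
--     for i in range(len(code)):
--         if code[i] not in '\n\t ':
--             indent_len = i
--             break
--     code = code.replace('\n' + ' ' * indent_len,'\n')[indent_len:]
--     return code
-- ===== SOURCE B (Python) =====
-- def fix_indent_from_str(code: str):
--     # Per-line dedent: split into lines, strip the common indent prefix from
--     # continuation lines, join, then drop the first indent_len characters.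
--     code = code.strip('\n')
--     indent_len = next((i for i, c in enumerate(code) if c not in '\n\t '), 0)
--     pad = ' ' * indent_len
--     lines = code.split('\n')
--     dedented = [lines[0]] + [l[indent_len:] if l.startswith(pad) else l
--                              for l in lines[1:]]
--     return '\n'.join(dedented)[indent_len:]
-- ===== Notes on version B (the rewrite author's own statement) =====
-- stated objective: alternative
-- what changed: Replaces A's single global str.replace of the newline-plus-indent pattern with an explicit per-line pass: split the stripped code into lines, strip the indent prefix from each continuation line that starts with it, join the lines back, then drop the first indent_len characters.
import Mathlib
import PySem

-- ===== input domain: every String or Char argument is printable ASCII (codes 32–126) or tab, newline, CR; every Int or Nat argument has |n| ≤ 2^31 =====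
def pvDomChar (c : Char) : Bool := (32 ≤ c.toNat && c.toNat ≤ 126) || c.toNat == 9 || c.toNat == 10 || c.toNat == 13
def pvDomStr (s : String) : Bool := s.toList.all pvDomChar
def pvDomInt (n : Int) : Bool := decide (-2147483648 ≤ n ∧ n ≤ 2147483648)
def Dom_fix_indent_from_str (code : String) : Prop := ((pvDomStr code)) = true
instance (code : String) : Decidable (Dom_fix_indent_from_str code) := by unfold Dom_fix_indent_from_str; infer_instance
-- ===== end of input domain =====

-- B dedents per line (split on '\n', strip the indent prefix from continuation lines, join, drop the first indent_len chars) instead of A's global str.replace; alternative decomposition, same result.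


-- ===== PORT A =====
-- 'indent_len = 0; for i in range(len(code)):  if code[i] not in "\n\t ": indent_len = i; break'
def fixIndentLoopA (code : String) : List Int → Int
  | [] => 0
  | i :: rest =>
    match PySem.Str.pyGet? code i with
    | some c => if PySem.Str.isIn (String.ofList [c]) "\n\t " then fixIndentLoopA code rest else i
    | none => 0  -- unreachable: i ranges over range(len(code))

def fix_indent_from_str (code : String) : String :=
  let code1 := PySem.Str.stripChars code "\n"
  let indent_len : Int := fixIndentLoopA code1 (PySem.List.pyRange 0 (PySem.Str.len code1) 1)
  -- code.replace('\n' + ' ' * indent_len, '\n')[indent_len:]   (indent_len ≥ 0, so ' ' * indent_len is exactly replicate)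
  PySem.Str.slice
    (PySem.Str.replace code1 (String.ofList ('\n' :: List.replicate indent_len.toNat ' ')) "\n")
    (some indent_len) none

-- ===== PORT B =====
-- next((i for i, c in enumerate(code) if c not in '\n\t '), 0)
def indentOfB (code : String) : Int :=
  match (PySem.List.enumerate code.toList 0).find?
      (fun p => !PySem.Str.isIn (String.ofList [p.2]) "\n\t ") with
  | some p => p.1
  | none => 0

def fix_indent_from_str_alt (code : String) : String :=
  let code1 := PySem.Str.stripChars code "\n"
  let indent : Int := indentOfB code1
  let pad := String.ofList (List.replicate indent.toNat ' ')
  match PySem.Str.split? code1 "\n" with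
  | none => ""       -- unreachable: the separator "\n" is nonempty
  | some [] => ""    -- unreachable: str.split always yields at least one piece
  | some (l0 :: rest) =>
    let dedented := l0 :: rest.map (fun l =>
      if PySem.Str.startswith l pad then PySem.Str.slice l (some indent) none else l)
    PySem.Str.slice (PySem.Str.join "\n" dedented) (some indent) none

-- ===== PRECONDITION & SPEC =====
def Spec_fix_indent_from_str (code : String) (out : String) : Prop := out = fix_indent_from_str_alt code
instance (code : String) (out : String) : Decidable (Spec_fix_indent_from_str code out) := by unfold Spec_fix_indent_from_str; infer_instance

-- ===== CLAIM (what is proved, stated in full; the proofs are below) =====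
def Claim_equal_fix_indent_from_str : Prop := ∀ (code : String), Dom_fix_indent_from_str code → Spec_fix_indent_from_str code (fix_indent_from_str code)

-- ===== LEMMAS AND PROOFS =====

def pvIsWs (c : Char) : Bool := c == '\n' || c == '\t' || c == ' '

-- common spec of both indent searches
def pvIdxFrom (k : Int) : List Char → Int
  | [] => 0
  | c :: t => if pvIsWs c then pvIdxFrom (k + 1) t else k

-- spec of A's replace on the '\n'+spaces pattern
def pvReplF (n : Nat) : List Char → List Char
  | [] => []
  | c :: t =>
    if c = '\n' ∧ (List.replicate n ' ').isPrefixOf t then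
      '\n' :: pvReplF n (t.drop n)
    else c :: pvReplF n t
termination_by l => l.length
decreasing_by
  · simp only [List.length_cons, List.length_drop]; omega
  · simp

-- spec of splitOn on '\n'
def pvLinesF (pre : List Char) : List Char → List (List Char)
  | [] => [pre]
  | c :: t => if c = '\n' then pre :: pvLinesF [] t else pvLinesF (pre ++ [c]) t

-- B's per-continuation-line dedent
def pvG (n : Nat) (m : List Char) : List Char :=
  if (List.replicate n ' ').isPrefixOf m then m.drop n else m

def pvTailJoin : List (List Char) → List Char
  | [] => []
  | m :: ms => '\n' :: (m ++ pvTailJoin ms)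

theorem pv_isIn_singleton (c : Char) :
    PySem.Str.isIn (String.ofList [c]) "\n\t " = pvIsWs c := by
  have h1 : (String.ofList [c]).toList = [c] := by simp
  have h2 : ("\n\t " : String).toList = ['\n', '\t', ' '] := by decide
  rw [PySem.Str.isIn_eq, h1, h2]
  by_cases hm : c ∈ ['\n', '\t', ' ']
  · rw [(PySem.Chars.isIn_iff_infix [c] _).mpr ((List.singleton_infix_iff c _).mpr hm)]
    simp at hm
    rcases hm with h | h | h <;> simp [pvIsWs, h]
  · rw [(PySem.Chars.isIn_eq_false_iff [c] _).mpr (fun hi => hm ((List.singleton_infix_iff c _).mp hi))]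
    simp at hm
    simp [pvIsWs, hm.1, hm.2.1, hm.2.2]

theorem pv_chars_isIn_singleton_aux (c : Char) :
    PySem.Chars.isIn [c] ['\n', '\t', ' '] = pvIsWs c := by
  have h := pv_isIn_singleton c
  rw [PySem.Str.isIn_eq] at h
  simpa using h

theorem pv_idxA (s : String) (k : Nat) (hk : k ≤ s.toList.length) :
    fixIndentLoopA s (PySem.List.pyRange k s.toList.length 1) = pvIdxFrom k (s.toList.drop k) := by
  rcases Nat.le.dest hk with ⟨d, hd⟩
  induction d generalizing k with
  | zero =>
    rw [PySem.List.pyRange_one_eq_nil (by omega)]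
    have : s.toList.drop k = [] := List.drop_eq_nil_of_le (by omega)
    rw [this]
    rfl
  | succ d ih =>
    have hklt : (k : Int) < (s.toList.length : Int) := by omega
    have hkl : k < s.toList.length := by omega
    have hdrop : s.toList.drop k = s.toList[k] :: s.toList.drop (k + 1) :=
      List.drop_eq_getElem_cons hkl
    rw [PySem.List.pyRange_one_cons hklt, hdrop]
    simp only [fixIndentLoopA]
    have hget : PySem.Str.pyGet? s (k : Int) = some s.toList[k] := by
      simp [List.getElem?_eq_getElem hkl]
    rw [hget]
    simp only [pv_isIn_singleton]
    by_cases hw : pvIsWs s.toList[k]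
    · simp only [hw, if_true]
      have hcast : ((k : Int) + 1) = ((k + 1 : Nat) : Int) := by push_cast; ring
      rw [hcast, ih (k+1) (by omega) (by omega)]
      simp [pvIdxFrom, hw]
    · rw [if_neg (by simp [hw])]
      simp [pvIdxFrom, hw]

theorem pv_idxB_gen (cs : List Char) (k : Int) :
    (match (PySem.List.enumerate cs k).find?
        (fun p => !PySem.Str.isIn (String.ofList [p.2]) "\n\t ") with
     | some p => p.1
     | none => 0) = pvIdxFrom k cs := by
  induction cs generalizing k with
  | nil => simp [PySem.List.enumerate_nil, pvIdxFrom]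
  | cons c t ih =>
    rw [PySem.List.enumerate_cons]
    by_cases hw : pvIsWs c
    · rw [List.find?_cons_of_neg (by simp [pv_chars_isIn_singleton_aux, hw]), ih]
      simp [pvIdxFrom, hw]
    · rw [List.find?_cons_of_pos (by simp [pv_chars_isIn_singleton_aux, hw])]
      simp [pvIdxFrom, hw]

theorem pv_idx_nonneg (k : Int) (cs : List Char) (h : 0 ≤ k) : 0 ≤ pvIdxFrom k cs := by
  induction cs generalizing k with
  | nil => simp [pvIdxFrom]
  | cons c t ih =>
    unfold pvIdxFrom
    split
    · exact ih (k+1) (by omega)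
    · exact h

theorem pv_go_repl (n : Nat) (fuel : Nat) (l acc : List Char) (h : l.length ≤ fuel) :
    PySem.Chars.replace.go ('\n' :: List.replicate n ' ') ['\n'] fuel l acc
      = acc.reverse ++ pvReplF n l := by
  induction fuel generalizing l acc with
  | zero =>
    have : l = [] := by
      cases l with
      | nil => rfl
      | cons a b => simp at h
    subst this
    simp [PySem.Chars.replace.go, pvReplF]
  | succ fuel ih =>
    cases l with
    | nil => simp [PySem.Chars.replace.go, pvReplF]
    | cons c t =>
      rw [PySem.Chars.replace.go]
      by_cases hp : ('\n' :: List.replicate n ' ').isPrefixOf (c :: t)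
      · rw [if_pos hp]
        have hc0 : '\n' = c ∧ (List.replicate n ' ') <+: t := by
          simpa [List.isPrefixOf_iff_prefix] using hp
        have hc : c = '\n' ∧ (List.replicate n ' ').isPrefixOf t := by
          exact ⟨hc0.1.symm, List.isPrefixOf_iff_prefix.mpr hc0.2⟩
        have hlen : (t.drop n).length ≤ fuel := by
          simp only [List.length_drop]
          simp at h
          omega
        have hd : List.drop ('\n' :: List.replicate n ' ').length (c :: t) = t.drop n := by
          simp
        rw [hd, ih _ _ hlen]
        rw [pvReplF, if_pos hc]
        simp
      · rw [if_neg hp]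
        have hc : ¬ (c = '\n' ∧ (List.replicate n ' ').isPrefixOf t) := by
          intro hcc
          refine hp ?_
          rw [List.isPrefixOf_iff_prefix] at hcc ⊢
          exact List.cons_prefix_cons.mpr ⟨hcc.1.symm, hcc.2⟩
        have hlen : t.length ≤ fuel := by simp at h; omega
        rw [ih _ _ hlen]
        rw [pvReplF, if_neg hc]
        simp

theorem pv_replace_eq (s : List Char) (n : Nat) :
    PySem.Chars.replace s ('\n' :: List.replicate n ' ') ['\n'] = pvReplF n s := by
  rw [PySem.Chars.replace]
  rw [if_neg (by simp)]
  simpa using pv_go_repl n s.length s [] le_rfl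

theorem pv_go_split (fuel : Nat) (l cur : List Char) (accl : List (List Char))
    (h : l.length < fuel) :
    PySem.Chars.splitOn.go ['\n'] fuel l cur accl
      = accl.reverse ++ pvLinesF cur.reverse l := by
  induction fuel generalizing l cur accl with
  | zero => omega
  | succ fuel ih =>
    cases l with
    | nil =>
      rw [PySem.Chars.splitOn.go]
      simp [pvLinesF]
      omega
    | cons c t =>
      rw [PySem.Chars.splitOn.go]
      by_cases hc : c = '\n'
      · rw [if_pos (by simp [hc])]
        have hd : List.drop ['\n'].length (c :: t) = t := by simp
        rw [hd, ih t [] (cur.reverse :: accl) (by simp at h; omega)]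
        rw [pvLinesF, if_pos hc]
        simp
      · rw [if_neg (by
          simp [List.isPrefixOf_iff_prefix, List.cons_prefix_cons]
          intro hh
          exact absurd hh.symm hc)]
        rw [ih t (c :: cur) accl (by simp at h; omega)]
        rw [pvLinesF, if_neg hc]
        simp

theorem pv_splitOn_eq (s : List Char) :
    PySem.Chars.splitOn s ['\n'] = pvLinesF [] s := by
  rw [PySem.Chars.splitOn]
  simpa using pv_go_split (s.length + 1) s [] [] (by omega)

-- a prefix of spaces transfers across a line boundary
theorem pv_prefix_transfer (n : Nat) (m tail : List Char) (htail : tail = [] ∨ ∃ t', tail = '\n' :: t') :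
    (List.replicate n ' ') <+: (m ++ tail) ↔ (List.replicate n ' ') <+: m := by
  by_cases hn : n ≤ m.length
  · rw [List.prefix_iff_eq_take, List.prefix_iff_eq_take, List.length_replicate]
    rw [List.take_append_of_le_length hn]
  · constructor
    · intro hp
      exfalso
      rcases htail with rfl | ⟨t', rfl⟩
      · have := hp.length_le
        simp at this
        omega
      · have heq : List.replicate n ' ' = (m ++ '\n' :: t').take n := by
          rw [List.prefix_iff_eq_take] at hp
          simpa using hp
        have hmem : '\n' ∈ (m ++ '\n' :: t').take n := by
          rw [List.mem_take_iff_getElem]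
          refine ⟨m.length, by simp; omega, ?_⟩
          rw [List.getElem_append_right le_rfl]
          simp
        rw [← heq] at hmem
        have := List.eq_of_mem_replicate hmem
        simp at this
    · intro hp
      exfalso
      have := hp.length_le
      simp at this
      omega

-- pvReplF walks through a newline-free block unchanged
theorem pv_replF_append (n : Nat) (l x : List Char) (hl : '\n' ∉ l) :
    pvReplF n (l ++ x) = l ++ pvReplF n x := by
  induction l with
  | nil => simp
  | cons c l' ih =>
    have hc : c ≠ '\n' := by
      intro h; exact hl (by simp [h])
    rw [List.cons_append, pvReplF, if_neg (by tauto)]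
    rw [ih (by intro h; exact hl (by simp [h]))]
    simp

theorem pv_tailJoin_shape (ms : List (List Char)) :
    pvTailJoin ms = [] ∨ ∃ t', pvTailJoin ms = '\n' :: t' := by
  cases ms with
  | nil => left; rfl
  | cons m ms => right; exact ⟨m ++ pvTailJoin ms, rfl⟩

theorem pv_main (n : Nat) (ms : List (List Char)) (hms : ∀ m ∈ ms, '\n' ∉ m) :
    pvReplF n (pvTailJoin ms) = pvTailJoin (ms.map (pvG n)) := by
  induction ms with
  | nil => simp [pvTailJoin, pvReplF]
  | cons m ms ih =>
    have hm : '\n' ∉ m := hms m (by simp)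
    have hrest : ∀ m' ∈ ms, '\n' ∉ m' := fun m' h => hms m' (by simp [h])
    show pvReplF n ('\n' :: (m ++ pvTailJoin ms)) = pvTailJoin (pvG n m :: ms.map (pvG n))
    rw [pvReplF]
    by_cases hsp : (List.replicate n ' ') <+: m
    · have hn : n ≤ m.length := by
        have := hsp.length_le; simpa using this
      rw [if_pos ⟨rfl, List.isPrefixOf_iff_prefix.mpr
        ((pv_prefix_transfer n m _ (pv_tailJoin_shape ms)).mpr hsp)⟩]
      rw [List.drop_append_of_le_length hn]
      rw [pv_replF_append n (m.drop n) _ (fun h => hm (List.mem_of_mem_drop h))]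
      rw [ih hrest]
      show _ = '\n' :: (pvG n m ++ _)
      rw [pvG, if_pos (List.isPrefixOf_iff_prefix.mpr hsp)]
    · rw [if_neg (by
        intro hcc
        exact hsp ((pv_prefix_transfer n m _ (pv_tailJoin_shape ms)).mp
          (List.isPrefixOf_iff_prefix.mp hcc.2)))]
      rw [pv_replF_append n m _ hm, ih hrest]
      show _ = '\n' :: (pvG n m ++ _)
      rw [pvG, if_neg (fun h => hsp (List.isPrefixOf_iff_prefix.mp h))]

theorem pv_lines_struct (s pre : List Char) :
    ∃ hd tl, pvLinesF pre s = hd :: tl ∧ hd ++ pvTailJoin tl = pre ++ s ∧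
      ('\n' ∉ pre → '\n' ∉ hd) ∧ (∀ m ∈ tl, '\n' ∉ m) := by
  induction s generalizing pre with
  | nil =>
    exact ⟨pre, [], rfl, by simp [pvTailJoin], fun h => h, by simp⟩
  | cons c t ih =>
    by_cases hc : c = '\n'
    · obtain ⟨hd', tl', he, hj, hnl, hms⟩ := ih []
      refine ⟨pre, hd' :: tl', ?_, ?_, fun h => h, ?_⟩
      · rw [pvLinesF, if_pos hc, he]
      · show pre ++ ('\n' :: (hd' ++ pvTailJoin tl')) = pre ++ c :: t
        rw [hj]
        simp [hc]
      · intro m hm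
        rcases List.mem_cons.mp hm with rfl | hm
        · exact hnl (by simp)
        · exact hms m hm
    · obtain ⟨hd, tl, he, hj, hnl, hms⟩ := ih (pre ++ [c])
      refine ⟨hd, tl, ?_, ?_, ?_, hms⟩
      · rw [pvLinesF, if_neg hc, he]
      · rw [hj]; simp
      · intro hpre
        refine hnl ?_
        intro h
        rcases List.mem_append.mp h with h | h
        · exact hpre h
        · simp at h; exact hc h.symm

theorem pv_join_cons (x : List Char) (xs : List (List Char)) :
    PySem.Chars.join ['\n'] (x :: xs) = x ++ pvTailJoin xs := by
  induction xs generalizing x with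
  | nil => simp [PySem.Chars.join, List.intercalate, pvTailJoin]
  | cons y ys ih =>
    show PySem.Chars.join ['\n'] (x :: y :: ys) = x ++ '\n' :: (y ++ pvTailJoin ys)
    rw [← ih y]
    simp [PySem.Chars.join, List.intercalate, List.intersperse]

theorem pv_string_ext (a b : String) (h : a.toList = b.toList) : a = b := by
  have := congrArg String.ofList h
  simpa using this

theorem pv_idxA_top (s : String) :
    fixIndentLoopA s (PySem.List.pyRange 0 (PySem.Str.len s) 1) = pvIdxFrom 0 s.toList := by
  have hlen : PySem.Str.len s = ((s.toList.length : Nat) : Int) := by simp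
  rw [hlen]
  have h := pv_idxA s 0 (Nat.zero_le _)
  simpa using h

theorem pv_idxB_top (s : String) : indentOfB s = pvIdxFrom 0 s.toList := by
  unfold indentOfB
  exact pv_idxB_gen s.toList 0

theorem pv_main_eq (code : String) : fix_indent_from_str code = fix_indent_from_str_alt code := by
  unfold fix_indent_from_str fix_indent_from_str_alt
  simp only []
  generalize PySem.Str.stripChars code "\n" = code1
  rw [pv_idxA_top, pv_idxB_top]
  have hnn : 0 ≤ pvIdxFrom 0 code1.toList := pv_idx_nonneg 0 _ le_rfl
  obtain ⟨n, hn⟩ : ∃ m : Nat, pvIdxFrom 0 code1.toList = (m : Int) :=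
    ⟨(pvIdxFrom 0 code1.toList).toNat, (Int.toNat_of_nonneg hnn).symm⟩
  rw [hn]
  obtain ⟨hd, tl, hlines, hjoin, hnl, htl⟩ := pv_lines_struct code1.toList []
  have hhd : '\n' ∉ hd := hnl (by simp)
  have hjoin' : hd ++ pvTailJoin tl = code1.toList := by simpa using hjoin
  have hsep : ("\n" : String).toList = ['\n'] := by decide
  have hsplit : PySem.Str.split? code1 "\n" = some (String.ofList hd :: tl.map String.ofList) := by
    unfold PySem.Str.split? PySem.Chars.split?
    rw [hsep, if_neg (by simp), pv_splitOn_eq, hlines]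
    simp
  rw [hsplit]
  show PySem.Str.slice
      (PySem.Str.replace code1 (String.ofList ('\n' :: List.replicate ((n : Int)).toNat ' ')) "\n")
      (some (n : Int)) none
    = PySem.Str.slice
      (PySem.Str.join "\n" (String.ofList hd :: List.map (fun l =>
        if PySem.Str.startswith l (String.ofList (List.replicate ((n : Int)).toNat ' '))
        then PySem.Str.slice l (some ((n : Int))) none else l) (tl.map String.ofList)))
      (some (n : Int)) none
  refine congrArg (fun x => PySem.Str.slice x (some (n : Int)) none) ?_
  apply pv_string_ext
  rw [PySem.Str.toList_replace, PySem.Str.toList_join]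
  have hpat : (String.ofList ('\n' :: List.replicate ((n : Int)).toNat ' ')).toList
      = '\n' :: List.replicate n ' ' := by simp
  rw [hpat, hsep, pv_replace_eq]
  have hone : ∀ m : List Char,
      (if PySem.Str.startswith (String.ofList m) (String.ofList (List.replicate ((n : Int)).toNat ' '))
       then PySem.Str.slice (String.ofList m) (some ((n : Int))) none
       else String.ofList m).toList = pvG n m := by
    intro m
    have htn : ((n : Int)).toNat = n := by simp
    rw [htn, pvG]
    have hsw : PySem.Str.startswith (String.ofList m) (String.ofList (List.replicate n ' '))
        = (List.replicate n ' ').isPrefixOf m := by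
      simp [PySem.Chars.startswith]
    by_cases hp : (List.replicate n ' ').isPrefixOf m
    · rw [if_pos (by rw [hsw]; exact hp), if_pos hp]
      simp [PySem.List.slice_from_natCast]
    · rw [if_neg (by rw [hsw]; exact hp), if_neg hp]
      simp
  have hmapped : List.map String.toList (List.map (fun l =>
        if PySem.Str.startswith l (String.ofList (List.replicate ((n : Int)).toNat ' '))
        then PySem.Str.slice l (some ((n : Int))) none else l) (tl.map String.ofList))
      = tl.map (pvG n) := by
    rw [List.map_map, List.map_map]
    exact List.map_congr_left fun m _ => hone m
  rw [List.map_cons, hmapped]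
  have hhdtl : (String.ofList hd).toList = hd := by simp
  rw [hhdtl, pv_join_cons, ← hjoin']
  rw [pv_replF_append n hd _ hhd, pv_main n tl htl]

-- ===== VERDICT (by name: the statement is the Claim_ definition above) =====
theorem fix_indent_from_str_spec : Claim_equal_fix_indent_from_str := by
  intro code _hdom
  unfold Spec_fix_indent_from_str
  exact pv_main_eq code
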